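-- pv_equiv track=rewrite | github.com/atiqullah-ahmadzai/real-life-security | Code/myutils.py | getcontextPos
-- ===== SOURCE A (Python) =====
-- def nextsplit(sourcecode, focus):
--     splitchars = [" ", "\t", "\n", ".", ":", "(", ")", "[", "]", "<", ">", "+", "-", "=",
--                   "\"", "\'", "*", "/", "\\", "~", "{", "}", "!", "?", ";", ",", "%", "&"]
--     for pos in range(focus + 1, len(sourcecode)):
--         if sourcecode[pos] in splitchars:
--             return pos
--     return -1
--
-- def previoussplit(sourcecode, focus):
--     splitchars = [" ", "\t", "\n", ".", ":", "(", ")", "[", "]", "<", ">", "+", "-", "=",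
--                   "\"", "\'", "*", "/", "\\", "~", "{", "}", "!", "?", ";", ",", "%", "&"]
--     pos = focus - 1
--     while pos >= 0:
--         if sourcecode[pos] in splitchars:
--             return pos
--         pos -= 1
--     return -1
--
-- def getcontextPos(sourcecode, focus, fulllength):
--     startcontext = focus
--     endcontext = focus
--     if focus >= len(sourcecode):
--         return None
--     toggle = True
--     while len(sourcecode[startcontext:endcontext]) < fulllength:
--         prev = previoussplit(sourcecode, startcontext)
--         nxt = nextsplit(sourcecode, endcontext)
--         if prev == -1 and nxt == -1:
--             return None
--         if toggle and prev > -1: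
--             startcontext = prev
--         elif not toggle and nxt > -1:
--             endcontext = nxt
--         toggle = not toggle
--     return [startcontext, endcontext]
-- ===== SOURCE B (Python) =====
-- def getcontextPos(sourcecode, focus, fulllength):
--     n = len(sourcecode)
--     if focus >= n:
--         return None
--     splitchars = set(" \t\n.:()[]<>+-=\"'*/\\~{}!?;,%&")
--     splits = [k for k, c in enumerate(sourcecode) if c in splitchars]
--     left = [p for p in splits if p < focus][::-1]   # nearest previous split first
--     right = [p for p in splits if p > focus]        # nearest next split first
--     start = end = focus
--     i = j = 0
--     toggle = True
--     while end - start < fulllength: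
--         if i == len(left) and j == len(right):
--             return None
--         if toggle and i < len(left):
--             start = left[i]; i += 1
--         elif not toggle and j < len(right):
--             end = right[j]; j += 1
--         toggle = not toggle
--     return [start, end]
-- ===== Notes on version B (the rewrite author's own statement) =====
-- stated objective: faster
-- what changed: B precomputes the list of split-character positions once and walks it with two index pointers (nearest-previous / nearest-next), so each expansion step is O(1) instead of A's per-step linear rescans by previoussplit/nextsplit plus a slice to measure the window length.
-- outside the precondition, e.g. on getcontextPos('ab cd', -3, 2): A returns None, B returns [-3, 2]; on getcontextPos('..', -3, 9): A does not finish within the time limit, B returns None; on getcontextPos('', -2, 1): A raises IndexError, B returns None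
import Mathlib
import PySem

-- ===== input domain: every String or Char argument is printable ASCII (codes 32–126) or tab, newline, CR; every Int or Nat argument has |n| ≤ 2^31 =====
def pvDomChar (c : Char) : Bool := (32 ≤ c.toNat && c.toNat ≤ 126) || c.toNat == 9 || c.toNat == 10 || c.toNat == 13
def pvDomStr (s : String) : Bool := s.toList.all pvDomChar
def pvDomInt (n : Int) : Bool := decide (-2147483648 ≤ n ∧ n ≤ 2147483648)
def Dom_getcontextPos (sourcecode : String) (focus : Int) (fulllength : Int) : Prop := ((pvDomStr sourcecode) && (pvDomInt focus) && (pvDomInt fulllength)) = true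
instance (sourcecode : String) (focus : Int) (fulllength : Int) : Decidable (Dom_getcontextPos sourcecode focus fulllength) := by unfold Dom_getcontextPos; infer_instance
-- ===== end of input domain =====

-- B precomputes the split-character positions once and walks them with two index pointers,
-- replacing A's per-step linear rescans (previoussplit/nextsplit/slice); measured faster.

-- the 28 split characters (same constant table in A and B)
def pvSplitChars : List Char :=
  [' ', '\t', '\n', '.', ':', '(', ')', '[', ']', '<', '>', '+', '-', '=',
   '"', '\'', '*', '/', '\\', '~', '{', '}', '!', '?', ';', ',', '%', '&']

-- ===== PORT A =====
-- 'for pos in range(focus+1, len(sourcecode))': upward scan; exact for focus ≥ -1 (A only calls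
-- it with focus ≥ 0 on inputs admitted by Pre_).
def nextAux (cs : List Char) (pos : Nat) : Int :=
  if _h : pos < cs.length then
    if cs.getD pos ' ' ∈ pvSplitChars then (pos : Int) else nextAux cs (pos + 1)
  else -1
termination_by cs.length - pos

def nextsplit (sourcecode : String) (focus : Int) : Int :=
  nextAux sourcecode.toList (focus + 1).toNat

-- 'pos = focus - 1; while pos >= 0: …': downward scan; prevAux cs m inspects m-1, m-2, …, 0.
-- Exact for focus ≤ len(sourcecode) (A only calls it so); for focus ≤ 0 both give -1.
def prevAux (cs : List Char) : Nat → Int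
  | 0 => -1
  | p + 1 => if cs.getD p ' ' ∈ pvSplitChars then (p : Int) else prevAux cs p

def previoussplit (sourcecode : String) (focus : Int) : Int :=
  prevAux sourcecode.toList focus.toNat

-- A's while loop; fuel 2*len+4 strictly exceeds the iteration count (each pair of consecutive
-- iterations moves startcontext down or endcontext up to a fresh split position, or returns),
-- so the 0-fuel branch is never reached on inputs satisfying Pre_.
def aLoop (sourcecode : String) (fulllength : Int) : Nat → Int → Int → Bool → Option (List Int)
  | 0, _, _, _ => none
  | fuel + 1, st, en, tog =>
    -- len(sourcecode[st:en]) — Python string-slice length, computed on the char list (exact)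
    if ((PySem.List.slice sourcecode.toList (some st) (some en)).length : Int) < fulllength then
      let prev := previoussplit sourcecode st
      let nxt := nextsplit sourcecode en
      if prev = -1 ∧ nxt = -1 then none
      else if tog ∧ prev > -1 then aLoop sourcecode fulllength fuel prev en (!tog)
      else if (¬ tog = true) ∧ nxt > -1 then aLoop sourcecode fulllength fuel st nxt (!tog)
      else aLoop sourcecode fulllength fuel st en (!tog)
    else some [st, en]

def getcontextPos (sourcecode : String) (focus : Int) (fulllength : Int) : Option (List Int) :=
  if focus ≥ (sourcecode.toList.length : Int) then none
  else aLoop sourcecode fulllength (2 * sourcecode.toList.length + 4) focus focus true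

-- ===== PORT B =====
-- B's while loop: left/right hold the split positions before/after focus (nearest first),
-- i/j are B's index pointers into them.  Same fuel bound as A's loop (same iteration count).
def bLoop (fulllength : Int) (left right : List Int) :
    Nat → Int → Int → Bool → Nat → Nat → Option (List Int)
  | 0, _, _, _, _, _ => none
  | fuel + 1, st, en, tog, i, j =>
    if en - st < fulllength then
      if i = left.length ∧ j = right.length then none
      else if tog ∧ i < left.length then
        bLoop fulllength left right fuel (left.getD i 0) en (!tog) (i + 1) j
      else if (¬ tog = true) ∧ j < right.length then
        bLoop fulllength left right fuel st (right.getD j 0) (!tog) i (j + 1)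
      else bLoop fulllength left right fuel st en (!tog) i j
    else some [st, en]

def getcontextPos_alt (sourcecode : String) (focus : Int) (fulllength : Int) : Option (List Int) :=
  let cs := sourcecode.toList
  if focus ≥ (cs.length : Int) then none
  else
    -- splits = [k for k, c in enumerate(sourcecode) if c in splitchars]
    let splits : List Int :=
      ((PySem.List.enumerate cs 0).filter (fun kc => kc.2 ∈ pvSplitChars)).map Prod.fst
    let left := (splits.filter (fun p => p < focus)).reverse   -- [::-1] = reverse
    let right := splits.filter (fun p => focus < p)
    bLoop fulllength left right (2 * cs.length + 4) focus focus true 0 0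

-- ===== PRECONDITION & SPEC =====
-- Pre_ excludes negative focus, outside the function's natural domain: there A's scans run
-- through Python's negative-index wraparound and, depending on the input, raise IndexError
-- (focus below -len-1), loop forever (the -1 'not found' sentinel collides with a genuinely
-- negative split position), or return an accidental wraparound value.
def Pre_getcontextPos (sourcecode : String) (focus : Int) (fulllength : Int) : Prop :=
  0 ≤ focus
instance (sourcecode : String) (focus : Int) (fulllength : Int) :
    Decidable (Pre_getcontextPos sourcecode focus fulllength) := by
  unfold Pre_getcontextPos; infer_instance

def pvWitness_getcontextPos : String × Int × Int := ("ab cd", 1, 3)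

def Spec_getcontextPos (sourcecode : String) (focus : Int) (fulllength : Int) (out : Option (List Int)) : Prop := out = getcontextPos_alt sourcecode focus fulllength
instance (sourcecode : String) (focus : Int) (fulllength : Int) (out : Option (List Int)) : Decidable (Spec_getcontextPos sourcecode focus fulllength out) := by unfold Spec_getcontextPos; infer_instance

-- ===== CLAIM (what is proved, stated in full; the proofs are below) =====
def Claim_equal_getcontextPos : Prop := ∀ (sourcecode : String) (focus : Int) (fulllength : Int), Dom_getcontextPos sourcecode focus fulllength → Pre_getcontextPos sourcecode focus fulllength → Spec_getcontextPos sourcecode focus fulllength (getcontextPos sourcecode focus fulllength)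

-- ===== LEMMAS AND PROOFS =====

-- the split predicate on a position, and the split-position list, proof-side
def pvQ (cs : List Char) (k : Nat) : Bool := cs.getD k ' ' ∈ pvSplitChars

def pvSplits (cs : List Char) : List Int :=
  ((PySem.List.enumerate cs 0).filter (fun kc => kc.2 ∈ pvSplitChars)).map Prod.fst

theorem pv_enum_eq (cs : List Char) : ∀ (s0 : Int),
    ((PySem.List.enumerate cs s0).filter (fun kc => kc.2 ∈ pvSplitChars)).map Prod.fst
      = ((List.range cs.length).filter (pvQ cs)).map (fun (k : Nat) => s0 + (k : Int)) := by
  induction cs with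
  | nil => intro s0; simp [PySem.List.enumerate_nil]
  | cons c cs ih =>
    intro s0
    have hq0 : pvQ (c :: cs) 0 = decide (c ∈ pvSplitChars) := by simp [pvQ]
    have hmapf : (List.filter (pvQ (c :: cs)) ((List.range cs.length).map Nat.succ))
        = ((List.range cs.length).filter (pvQ cs)).map Nat.succ := by
      rw [List.filter_map]
      congr 1
    have hshift : (((List.range cs.length).filter (pvQ cs)).map Nat.succ).map
          (fun (k : Nat) => s0 + (k : Int))
        = ((List.range cs.length).filter (pvQ cs)).map (fun (k : Nat) => (s0 + 1) + (k : Int)) := by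
      rw [List.map_map]
      apply List.map_congr_left
      intro k _
      simp [Function.comp, Nat.succ_eq_add_one]
      ring
    rw [PySem.List.enumerate_cons, List.filter_cons]
    rw [List.length_cons, List.range_succ_eq_map, List.filter_cons, hq0, hmapf]
    by_cases hc : c ∈ pvSplitChars
    · rw [if_pos (by simpa), if_pos (by simpa)]
      rw [List.map_cons, List.map_cons, ih (s0 + 1), hshift]
      simp
    · rw [if_neg (by simpa), if_neg (by simpa)]
      rw [ih (s0 + 1), hshift]

theorem pvSplits_eq (cs : List Char) :
    pvSplits cs = ((List.range cs.length).filter (pvQ cs)).map (fun (k : Nat) => (k : Int)) := by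
  rw [pvSplits, pv_enum_eq cs 0]
  simp

theorem pvSplits_mem (cs : List Char) (x : Int) (hx : x ∈ pvSplits cs) :
    0 ≤ x ∧ x < (cs.length : Int) := by
  rw [pvSplits_eq] at hx
  simp only [List.mem_map, List.mem_filter, List.mem_range] at hx
  obtain ⟨k, ⟨hk, _⟩, rfl⟩ := hx
  omega

theorem pvSplits_pairwise (cs : List Char) : (pvSplits cs).Pairwise (· < ·) := by
  rw [pvSplits_eq]
  exact ((List.pairwise_lt_range).filter _).map _ (by intro a b h; exact_mod_cast h)

theorem prevAux_eq (cs : List Char) : ∀ (m : Nat),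
    prevAux cs m = ((((List.range m).filter (pvQ cs)).map (fun (k : Nat) => (k : Int))).reverse).headD (-1) := by
  intro m
  induction m with
  | zero => simp [prevAux]
  | succ p ih =>
    rw [List.range_succ, List.filter_append, List.map_append, List.reverse_append]
    by_cases hq : pvQ cs p
    · rw [prevAux, if_pos (by simpa [pvQ] using hq)]
      simp [hq]
    · rw [prevAux, if_neg (by simpa [pvQ] using hq)]
      simp [hq, ih]

theorem prev_char (s : String) (st : Int) (h0 : 0 ≤ st) (hn : st ≤ (s.toList.length : Int)) :
    previoussplit s st
      = (((pvSplits s.toList).filter (fun q => decide (q < st))).reverse).headD (-1) := by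
  have key : (pvSplits s.toList).filter (fun q => decide (q < st))
      = ((List.range st.toNat).filter (pvQ s.toList)).map (fun (k : Nat) => (k : Int)) := by
    rw [pvSplits_eq, List.filter_map, List.filter_filter]
    have hsplit : List.range s.toList.length
        = List.range st.toNat ++ (List.range (s.toList.length - st.toNat)).map (fun k => st.toNat + k) := by
      rw [← List.range_add]
      congr 1
      omega
    rw [hsplit, List.filter_append]
    have h1 : (List.range st.toNat).filter (fun a => ((fun q => decide (q < st)) ∘ (fun (k : Nat) => (k : Int))) a && pvQ s.toList a)
        = (List.range st.toNat).filter (pvQ s.toList) := by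
      apply List.filter_congr
      intro k hk
      simp only [List.mem_range] at hk
      have hlt : ((k : Int) < st) := by omega
      simp [hlt]
    have h2 : ((List.range (s.toList.length - st.toNat)).map (fun k => st.toNat + k)).filter
          (fun a => ((fun q => decide (q < st)) ∘ (fun (k : Nat) => (k : Int))) a && pvQ s.toList a) = [] := by
      rw [List.filter_eq_nil_iff]
      intro a ha
      simp only [List.mem_map] at ha
      obtain ⟨k, _, rfl⟩ := ha
      simp only [Function.comp_apply, Bool.and_eq_true, decide_eq_true_eq, not_and]
      intro hlt
      exfalso
      push_cast at hlt
      omega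
    rw [h1, h2, List.append_nil]
  rw [previoussplit, prevAux_eq, key]

theorem nextAux_eq (cs : List Char) : ∀ (pos : Nat),
    nextAux cs pos
      = ((((List.range' pos (cs.length - pos)).filter (pvQ cs)).map (fun (k : Nat) => (k : Int)))).headD (-1) := by
  have H : ∀ (d pos : Nat), cs.length - pos = d → nextAux cs pos
      = ((((List.range' pos (cs.length - pos)).filter (pvQ cs)).map (fun (k : Nat) => (k : Int)))).headD (-1) := by
    intro d
    induction d with
    | zero =>
      intro pos hd
      rw [nextAux, dif_neg (by omega)]
      rw [hd]
      simp
    | succ k ih =>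
      intro pos hd
      have hlt : pos < cs.length := by omega
      rw [nextAux, dif_pos hlt, hd, List.range'_succ, List.filter_cons]
      by_cases hq : pvQ cs pos
      · rw [if_pos (by simpa [pvQ] using hq)]
        simp [hq]
      · rw [if_neg (by simpa [pvQ] using hq)]
        rw [ih (pos + 1) (by omega)]
        simp [hq, show cs.length - (pos + 1) = k from by omega]
  intro pos
  exact H (cs.length - pos) pos rfl

theorem next_char (s : String) (en : Int) (h0 : 0 ≤ en) :
    nextsplit s en = (((pvSplits s.toList).filter (fun q => decide (en < q)))).headD (-1) := by
  have key : (pvSplits s.toList).filter (fun q => decide (en < q))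
      = ((List.range' (en + 1).toNat (s.toList.length - (en + 1).toNat)).filter (pvQ s.toList)).map
          (fun (k : Nat) => (k : Int)) := by
    rw [pvSplits_eq, List.filter_map, List.filter_filter]
    by_cases hle : (en + 1).toNat ≤ s.toList.length
    · have hsplit : List.range s.toList.length
          = List.range (en + 1).toNat ++ List.range' (en + 1).toNat (s.toList.length - (en + 1).toNat) := by
        rw [List.range'_eq_map_range, ← List.range_add]
        congr 1
        omega
      rw [hsplit, List.filter_append]
      have h1 : (List.range (en + 1).toNat).filter
            (fun a => ((fun q => decide (en < q)) ∘ (fun (k : Nat) => (k : Int))) a && pvQ s.toList a) = [] := by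
        rw [List.filter_eq_nil_iff]
        intro a ha
        simp only [List.mem_range] at ha
        simp only [Function.comp_apply, Bool.and_eq_true, decide_eq_true_eq, not_and]
        intro hlt
        exfalso
        omega
      have h2 : (List.range' (en + 1).toNat (s.toList.length - (en + 1).toNat)).filter
            (fun a => ((fun q => decide (en < q)) ∘ (fun (k : Nat) => (k : Int))) a && pvQ s.toList a)
          = (List.range' (en + 1).toNat (s.toList.length - (en + 1).toNat)).filter (pvQ s.toList) := by
        apply List.filter_congr
        intro a ha
        rw [List.mem_range'_1] at ha
        have hgt : en < (a : Int) := by omega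
        simp [hgt]
      rw [h1, h2, List.nil_append]
    · rw [show s.toList.length - (en + 1).toNat = 0 from by omega]
      simp only [List.range'_zero, List.filter_nil, List.map_nil]
      rw [List.map_eq_nil_iff, List.filter_eq_nil_iff]
      intro a ha
      simp only [List.mem_range] at ha
      simp only [Function.comp_apply, Bool.and_eq_true, decide_eq_true_eq, not_and]
      intro hlt
      exfalso
      omega
  rw [nextsplit, nextAux_eq, key]

theorem filt_lt_step (l : List Int) (hp : l.Pairwise (· < ·)) (st p : Int) (rest : List Int)
    (h : (l.filter (fun q => decide (q < st))).reverse = p :: rest) :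
    (l.filter (fun q => decide (q < p))).reverse = rest := by
  have hF : l.filter (fun q => decide (q < st)) = rest.reverse ++ [p] := by
    have h2 := congrArg List.reverse h
    simpa using h2
  have hpF : p ∈ l.filter (fun q => decide (q < st)) := by rw [hF]; simp
  have hpst : p < st := by simpa using (List.mem_filter.mp hpF).2
  have hpair : (l.filter (fun q => decide (q < st))).Pairwise (· < ·) := hp.filter _
  have hrest : ∀ q ∈ rest, q < p := by
    intro q hq
    rw [hF] at hpair
    exact (List.pairwise_append.mp hpair).2.2 q (by simpa using hq) p (by simp)
  have hstep : l.filter (fun q => decide (q < p)) = rest.reverse := by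
    have h1 : l.filter (fun q => decide (q < p))
        = (l.filter (fun q => decide (q < st))).filter (fun q => decide (q < p)) := by
      rw [List.filter_filter]
      apply List.filter_congr
      intro q _
      by_cases hq : q < p
      · simp [hq, lt_trans hq hpst]
      · simp [hq]
    rw [h1, hF, List.filter_append]
    have h2 : rest.reverse.filter (fun q => decide (q < p)) = rest.reverse := by
      rw [List.filter_eq_self]
      intro q hq
      simp [hrest q (by simpa using hq)]
    have h3 : [p].filter (fun q => decide (q < p)) = [] := by simp
    rw [h2, h3, List.append_nil]
  rw [hstep, List.reverse_reverse]

theorem filt_gt_step (l : List Int) (hp : l.Pairwise (· < ·)) (en p : Int) (rest : List Int)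
    (h : l.filter (fun q => decide (en < q)) = p :: rest) :
    l.filter (fun q => decide (p < q)) = rest := by
  have hpF : p ∈ l.filter (fun q => decide (en < q)) := by rw [h]; simp
  have hpen : en < p := by simpa using (List.mem_filter.mp hpF).2
  have hpair : (l.filter (fun q => decide (en < q))).Pairwise (· < ·) := hp.filter _
  rw [h] at hpair
  have hrest : ∀ q ∈ rest, p < q := (List.pairwise_cons.mp hpair).1
  have h1 : l.filter (fun q => decide (p < q))
      = (l.filter (fun q => decide (en < q))).filter (fun q => decide (p < q)) := by
    rw [List.filter_filter]
    apply List.filter_congr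
    intro q _
    by_cases hq : p < q
    · simp [hq, lt_trans hpen hq]
    · simp [hq]
  rw [h1, h, List.filter_cons]
  simp only [decide_eq_true_eq, lt_irrefl, if_false]
  rw [List.filter_eq_self]
  intro q hq
  simp [hrest q hq]

theorem loop_eq (s : String) (l : Int) (left right : List Int) : ∀ (fuel : Nat)
    (st en : Int) (tog : Bool) (i j : Nat),
    0 ≤ st → st ≤ en → en ≤ (s.toList.length : Int) →
    left.drop i = ((pvSplits s.toList).filter (fun q => decide (q < st))).reverse →
    right.drop j = (pvSplits s.toList).filter (fun q => decide (en < q)) →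
    i ≤ left.length → j ≤ right.length →
    aLoop s l fuel st en tog = bLoop l left right fuel st en tog i j := by
  intro fuel
  induction fuel with
  | zero => intro st en tog i j _ _ _ _ _ _ _; rfl
  | succ fuel ih =>
    intro st en tog i j h0 hse hen hL hR hi hj
    have hslice : ((PySem.List.slice s.toList (some st) (some en)).length : Int) = en - st := by
      rw [PySem.List.slice_toNat _ h0 (by omega)]
      rw [List.length_take, List.length_drop]
      omega
    have hprev : previoussplit s st = (left.drop i).headD (-1) := by
      rw [prev_char s st h0 (by omega), hL]
    have hnxt : nextsplit s en = (right.drop j).headD (-1) := by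
      rw [next_char s en (by omega), hR]
    simp only [aLoop, bLoop, hslice]
    by_cases hcond : en - st < l
    · rw [if_pos hcond, if_pos hcond]
      rcases hld : left.drop i with _ | ⟨p, restL⟩ <;> rcases hrd : right.drop j with _ | ⟨q, restR⟩
      · -- both exhausted
        have hilen : i = left.length := by
          have := List.drop_eq_nil_iff.mp hld
          omega
        have hjlen : j = right.length := by
          have := List.drop_eq_nil_iff.mp hrd
          omega
        rw [if_pos (show previoussplit s st = -1 ∧ nextsplit s en = -1 from
              ⟨by rw [hprev, hld]; rfl, by rw [hnxt, hrd]; rfl⟩),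
            if_pos (show i = left.length ∧ j = right.length from ⟨hilen, hjlen⟩)]
      · -- left exhausted, right available
        have hqmem' : q ∈ (pvSplits s.toList).filter (fun r => decide (en < r)) := by
          rw [← hR, hrd]; simp
        have hqmem : q ∈ pvSplits s.toList := (List.mem_filter.mp hqmem').1
        have hqgt : en < q := by simpa using (List.mem_filter.mp hqmem').2
        obtain ⟨hq0, hqn⟩ := pvSplits_mem s.toList q hqmem
        have hjlt : j < right.length := by
          rcases Nat.lt_or_ge j right.length with h | h
          · exact h
          · rw [List.drop_eq_nil_iff.mpr (by omega)] at hrd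
            simp at hrd
        have hilen : i = left.length := by
          have := List.drop_eq_nil_iff.mp hld
          omega
        have hprevm1 : previoussplit s st = -1 := by rw [hprev, hld]; rfl
        have hnxtq : nextsplit s en = q := by rw [hnxt, hrd]; rfl
        have hgetD : right.getD j 0 = q := by
          rw [List.getD_eq_getElem?_getD, ← List.head?_drop, hrd]; rfl
        have hdropR : right.drop (j + 1) = restR := by
          rw [← List.drop_drop, hrd]; rfl
        rw [if_neg (show ¬ (previoussplit s st = -1 ∧ nextsplit s en = -1) by
              rw [hnxtq]; intro hand; omega),
            if_neg (show ¬ (i = left.length ∧ j = right.length) by intro hand; omega)]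
        by_cases htog : tog = true
        · rw [if_neg (show ¬ (tog = true ∧ previoussplit s st > -1) by
                rw [hprevm1]; intro hand; omega),
              if_neg (show ¬ (tog = true ∧ i < left.length) by intro hand; omega),
              if_neg (show ¬ (¬ tog = true ∧ nextsplit s en > -1) by
                intro hand; exact hand.1 htog),
              if_neg (show ¬ (¬ tog = true ∧ j < right.length) by
                intro hand; exact hand.1 htog)]
          exact ih st en (!tog) i j h0 hse hen hL hR hi hj
        · rw [if_neg (show ¬ (tog = true ∧ previoussplit s st > -1) by
                intro hand; exact htog hand.1),
              if_neg (show ¬ (tog = true ∧ i < left.length) by intro hand; exact htog hand.1),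
              if_pos (show (¬ tog = true) ∧ nextsplit s en > -1 from ⟨htog, by rw [hnxtq]; omega⟩),
              if_pos (show (¬ tog = true) ∧ j < right.length from ⟨htog, hjlt⟩),
              hnxtq, hgetD]
          exact ih st q (!tog) i (j + 1) h0 (by omega) (by omega) hL
            (by rw [hdropR]
                exact (filt_gt_step _ (pvSplits_pairwise s.toList) en q restR (by rw [← hR, hrd])).symm)
            hi (by omega)
      · -- left available, right exhausted
        have hpmem' : p ∈ ((pvSplits s.toList).filter (fun r => decide (r < st))).reverse := by
          rw [← hL, hld]; simp
        have hpmem : p ∈ pvSplits s.toList :=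
          (List.mem_filter.mp (List.mem_reverse.mp hpmem')).1
        have hplt : p < st := by
          simpa using (List.mem_filter.mp (List.mem_reverse.mp hpmem')).2
        obtain ⟨hp0, hpn⟩ := pvSplits_mem s.toList p hpmem
        have hilt : i < left.length := by
          rcases Nat.lt_or_ge i left.length with h | h
          · exact h
          · rw [List.drop_eq_nil_iff.mpr (by omega)] at hld
            simp at hld
        have hjlen : j = right.length := by
          have := List.drop_eq_nil_iff.mp hrd
          omega
        have hprevp : previoussplit s st = p := by rw [hprev, hld]; rfl
        have hnxtm1 : nextsplit s en = -1 := by rw [hnxt, hrd]; rfl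
        have hgetD : left.getD i 0 = p := by
          rw [List.getD_eq_getElem?_getD, ← List.head?_drop, hld]; rfl
        have hdropL : left.drop (i + 1) = restL := by
          rw [← List.drop_drop, hld]; rfl
        rw [if_neg (show ¬ (previoussplit s st = -1 ∧ nextsplit s en = -1) by
              rw [hprevp]; intro hand; omega),
            if_neg (show ¬ (i = left.length ∧ j = right.length) by intro hand; omega)]
        by_cases htog : tog = true
        · rw [if_pos (show tog = true ∧ previoussplit s st > -1 from
                ⟨htog, by rw [hprevp]; omega⟩),
              if_pos (show tog = true ∧ i < left.length from ⟨htog, hilt⟩),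
              hprevp, hgetD]
          exact ih p en (!tog) (i + 1) j hp0 (by omega) hen
            (by rw [hdropL]
                exact (filt_lt_step _ (pvSplits_pairwise s.toList) st p restL (by rw [← hL, hld])).symm)
            hR (by omega) hj
        · rw [if_neg (show ¬ (tog = true ∧ previoussplit s st > -1) by
                intro hand; exact htog hand.1),
              if_neg (show ¬ (tog = true ∧ i < left.length) by intro hand; exact htog hand.1),
              if_neg (show ¬ (¬ tog = true ∧ nextsplit s en > -1) by
                rw [hnxtm1]; intro hand; omega),
              if_neg (show ¬ (¬ tog = true ∧ j < right.length) by intro hand; omega)]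
          exact ih st en (!tog) i j h0 hse hen hL hR hi hj
      · -- both available
        have hpmem' : p ∈ ((pvSplits s.toList).filter (fun r => decide (r < st))).reverse := by
          rw [← hL, hld]; simp
        have hpmem : p ∈ pvSplits s.toList :=
          (List.mem_filter.mp (List.mem_reverse.mp hpmem')).1
        have hplt : p < st := by
          simpa using (List.mem_filter.mp (List.mem_reverse.mp hpmem')).2
        obtain ⟨hp0, hpn⟩ := pvSplits_mem s.toList p hpmem
        have hqmem' : q ∈ (pvSplits s.toList).filter (fun r => decide (en < r)) := by
          rw [← hR, hrd]; simp
        have hqmem : q ∈ pvSplits s.toList := (List.mem_filter.mp hqmem').1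
        have hqgt : en < q := by simpa using (List.mem_filter.mp hqmem').2
        obtain ⟨hq0, hqn⟩ := pvSplits_mem s.toList q hqmem
        have hilt : i < left.length := by
          rcases Nat.lt_or_ge i left.length with h | h
          · exact h
          · rw [List.drop_eq_nil_iff.mpr (by omega)] at hld
            simp at hld
        have hjlt : j < right.length := by
          rcases Nat.lt_or_ge j right.length with h | h
          · exact h
          · rw [List.drop_eq_nil_iff.mpr (by omega)] at hrd
            simp at hrd
        have hprevp : previoussplit s st = p := by rw [hprev, hld]; rfl
        have hnxtq : nextsplit s en = q := by rw [hnxt, hrd]; rfl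
        have hgetDL : left.getD i 0 = p := by
          rw [List.getD_eq_getElem?_getD, ← List.head?_drop, hld]; rfl
        have hgetDR : right.getD j 0 = q := by
          rw [List.getD_eq_getElem?_getD, ← List.head?_drop, hrd]; rfl
        have hdropL : left.drop (i + 1) = restL := by
          rw [← List.drop_drop, hld]; rfl
        have hdropR : right.drop (j + 1) = restR := by
          rw [← List.drop_drop, hrd]; rfl
        rw [if_neg (show ¬ (previoussplit s st = -1 ∧ nextsplit s en = -1) by
              rw [hprevp]; intro hand; omega),
            if_neg (show ¬ (i = left.length ∧ j = right.length) by intro hand; omega)]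
        by_cases htog : tog = true
        · rw [if_pos (show tog = true ∧ previoussplit s st > -1 from
                ⟨htog, by rw [hprevp]; omega⟩),
              if_pos (show tog = true ∧ i < left.length from ⟨htog, hilt⟩),
              hprevp, hgetDL]
          exact ih p en (!tog) (i + 1) j hp0 (by omega) hen
            (by rw [hdropL]
                exact (filt_lt_step _ (pvSplits_pairwise s.toList) st p restL (by rw [← hL, hld])).symm)
            hR (by omega) hj
        · rw [if_neg (show ¬ (tog = true ∧ previoussplit s st > -1) by
                intro hand; exact htog hand.1),
              if_neg (show ¬ (tog = true ∧ i < left.length) by intro hand; exact htog hand.1),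
              if_pos (show (¬ tog = true) ∧ nextsplit s en > -1 from ⟨htog, by rw [hnxtq]; omega⟩),
              if_pos (show (¬ tog = true) ∧ j < right.length from ⟨htog, hjlt⟩),
              hnxtq, hgetDR]
          exact ih st q (!tog) i (j + 1) h0 (by omega) (by omega) hL
            (by rw [hdropR]
                exact (filt_gt_step _ (pvSplits_pairwise s.toList) en q restR (by rw [← hR, hrd])).symm)
            hi (by omega)
    · rw [if_neg hcond, if_neg hcond]

-- ===== VERDICT (by name: the statement is the Claim_ definition above) =====
theorem getcontextPos_spec : Claim_equal_getcontextPos := by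
  intro s f l _hdom hpre
  unfold Pre_getcontextPos at hpre
  unfold Spec_getcontextPos
  simp only [getcontextPos, getcontextPos_alt]
  by_cases hge : f ≥ (s.toList.length : Int)
  · rw [if_pos hge, if_pos hge]
  · rw [if_neg hge, if_neg hge]
    exact loop_eq s l _ _ _ f f true 0 0 hpre le_rfl (by omega) rfl rfl
      (Nat.zero_le _) (Nat.zero_le _)
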